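-- pv_equiv track=rewrite | github.com/SeanNelsonIO/Python | project_euler/problem_009/sol2_cleaned.py | solution
-- ===== SOURCE A (Python) =====
-- def solution(n: int = 1000) -> int:
--
--
--     product = -1
--     candidate = 0
--     for a in range(1, n // 3):
--
--         b = (n * n - 2 * a * n) // (2 * n - 2 * a)
--         c = n - a - b
--         if c * c == (a * a + b * b):
--             candidate = a * b * c
--             if candidate >= product:
--                 product = candidate
--     return product
-- ===== SOURCE B (Python) =====
-- def solution(n: int = 1000) -> int:
--     best = -1
--     a, b = 1, n - 2
--     while a <= b:
--         c = n - a - b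
--         f = a * a + b * b - c * c
--         if f < 0:
--             a += 1
--         elif f > 0:
--             b -= 1
--         else:
--             best = max(best, a * b * c)
--             a += 1
--     return best
-- ===== Notes on version B (the rewrite author's own statement) =====
-- stated objective: alternative
-- what changed: Replaces A's single loop that derives the second leg by an algebraic floor-division formula with a division-free two-pointer scan: a moves up and b moves down guided by the sign of a*a+b*b-c*c, keeping the maximum product.
import Mathlib
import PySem

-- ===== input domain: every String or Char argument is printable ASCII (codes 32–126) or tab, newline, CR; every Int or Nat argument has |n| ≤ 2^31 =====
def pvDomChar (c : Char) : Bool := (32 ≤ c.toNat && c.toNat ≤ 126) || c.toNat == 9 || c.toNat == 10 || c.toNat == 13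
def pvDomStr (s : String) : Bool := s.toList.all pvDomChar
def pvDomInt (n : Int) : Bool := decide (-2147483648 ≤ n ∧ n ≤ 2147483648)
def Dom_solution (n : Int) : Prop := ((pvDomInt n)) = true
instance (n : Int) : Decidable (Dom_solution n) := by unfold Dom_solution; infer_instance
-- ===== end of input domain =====

-- B replaces A's loop that derives the second leg by an algebraic floor-division formula
-- with a division-free two-pointer scan over the two legs (objective: alternative).

-- ===== PORT A =====
-- A's loop body: state is (product, candidate), exactly Python's two variables
def stepA (n : Int) (st : Int × Int) (a : Int) : Int × Int :=
  let b := Int.fdiv (n * n - 2 * a * n) (2 * n - 2 * a)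
  let c := n - a - b
  if c * c = a * a + b * b then
    let candidate := a * b * c
    if candidate ≥ st.1 then (candidate, candidate) else (st.1, candidate)
  else st

def solution (n : Int) : Int :=
  ((PySem.List.pyRange 1 (Int.fdiv n 3) 1).foldl (stepA n) (-1, 0)).1

-- ===== PORT B =====
-- B's while loop: two pointers a (up) and b (down), best as accumulator
def loopB (n a b best : Int) : Int :=
  if h : a ≤ b then
    let c := n - a - b
    let f := a * a + b * b - c * c
    if f < 0 then loopB n (a + 1) b best
    else if f > 0 then loopB n a (b - 1) best
    else loopB n (a + 1) b (max best (a * b * c))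
  else best
termination_by (b + 1 - a).toNat
decreasing_by all_goals omega

def solution_alt (n : Int) : Int := loopB n 1 (n - 2) (-1)

-- ===== PRECONDITION & SPEC =====
def Spec_solution (n : Int) (out : Int) : Prop := out = solution_alt n
instance (n : Int) (out : Int) : Decidable (Spec_solution n out) := by unfold Spec_solution; infer_instance

-- ===== CLAIM (what is proved, stated in full; the proofs are below) =====
def Claim_equal_solution : Prop := ∀ (n : Int), Dom_solution n → Spec_solution n (solution n)

-- ===== LEMMAS AND PROOFS =====

-- a Pythagorean triplet of perimeter n, ordered legs
def TripP (n x y : Int) : Prop :=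
  1 ≤ x ∧ x ≤ y ∧ 0 < n - x - y ∧ x * x + y * y = (n - x - y) * (n - x - y)

-- A's derived second leg
def pb (n a : Int) : Int := Int.fdiv (n * n - 2 * a * n) (2 * n - 2 * a)

-- A's loop body, flattened to a max-fold over the single `product` state
def gA (n : Int) (s a : Int) : Int :=
  if (n - a - pb n a) * (n - a - pb n a) = a * a + pb n a * pb n a then
    max s (a * pb n a * (n - a - pb n a))
  else s

-- generic fold facts --------------------------------------------------------

theorem foldl_mono_le {g : Int → Int → Int} (h : ∀ s x, s ≤ g s x) :
    ∀ (l : List Int) (s : Int), s ≤ l.foldl g s := by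
  intro l
  induction l with
  | nil => intro s; simp
  | cons x t ih => intro s; exact le_trans (h s x) (ih (g s x))

theorem foldl_ge_elem {g : Int → Int → Int} (h : ∀ s x, s ≤ g s x) {x v : Int}
    (hk : ∀ s, v ≤ g s x) :
    ∀ (l : List Int), x ∈ l → ∀ s, v ≤ l.foldl g s := by
  intro l
  induction l with
  | nil => intro hx; cases hx
  | cons y t ih =>
    intro hx s
    rcases List.mem_cons.mp hx with rfl | hx
    · exact le_trans (hk s) (foldl_mono_le h t (g s x))
    · exact ih hx (g s y)

theorem foldl_cases {g : Int → Int → Int} {P : Int → Int → Prop}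
    (h : ∀ s x, g s x = s ∨ P x (g s x)) :
    ∀ (l : List Int) (s : Int), l.foldl g s = s ∨ ∃ x ∈ l, P x (l.foldl g s) := by
  intro l
  induction l with
  | nil => intro s; left; rfl
  | cons y t ih =>
    intro s
    rcases ih (g s y) with heq | ⟨x, hx, hP⟩
    · rcases h s y with h0 | hP
      · left; rw [List.foldl_cons, heq, h0]
      · right
        refine ⟨y, List.mem_cons_self, ?_⟩
        rw [List.foldl_cons, heq]
        exact hP
    · right; exact ⟨x, List.mem_cons_of_mem _ hx, hP⟩

-- A-side lemmas --------------------------------------------------------------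

theorem gA_mono (n : Int) : ∀ s a, s ≤ gA n s a := by
  intro s a; unfold gA; split_ifs <;> simp

-- the first component of A's step is a guarded max
theorem stepA_fst (n : Int) (st : Int × Int) (a : Int) :
    (stepA n st a).1 = gA n st.1 a := by
  unfold stepA gA pb
  dsimp only
  split_ifs with h1 h2 <;> simp <;> omega

-- A's pair-state fold projects to a fold of gA
theorem solution_eq_fold (n : Int) :
    solution n = (PySem.List.pyRange 1 (Int.fdiv n 3) 1).foldl (gA n) (-1) := by
  unfold solution
  generalize PySem.List.pyRange 1 (Int.fdiv n 3) 1 = l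
  suffices h : ∀ (l : List Int) (p c : Int),
      (l.foldl (stepA n) (p, c)).1 = l.foldl (gA n) p by
    exact h l (-1) 0
  intro l
  induction l with
  | nil => intro p c; rfl
  | cons a t ih =>
    intro p c
    rw [List.foldl_cons, List.foldl_cons,
      show stepA n (p, c) a = ((stepA n (p, c) a).1, (stepA n (p, c) a).2) from rfl,
      ih, stepA_fst]

-- arithmetic facts ----------------------------------------------------------

-- in any triplet a+b+c = n, the second leg satisfies a linear equation
theorem triplet_linear (n a b : Int) (h : a * a + b * b = (n - a - b) * (n - a - b)) :
    b * (2 * n - 2 * a) = n * n - 2 * a * n := by linear_combination h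

-- A's floor division recovers the exact leg
theorem pb_exact (n a b : Int) (hne : 2 * n - 2 * a ≠ 0)
    (h : a * a + b * b = (n - a - b) * (n - a - b)) : pb n a = b := by
  unfold pb
  rw [← triplet_linear n a b h]
  exact Int.mul_fdiv_cancel _ hne

-- the smaller leg of a triplet of perimeter n is < n // 3
theorem leg_lt_third (n a b : Int) (ha : 1 ≤ a) (hab : a ≤ b) (hc : 0 < n - a - b)
    (h : a * a + b * b = (n - a - b) * (n - a - b)) : a < Int.fdiv n 3 := by
  have hcb : b < n - a - b := by nlinarith
  rw [Int.fdiv_eq_ediv]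
  have hn : 3 * a + 3 ≤ n := by
    rcases (by omega : n = 3 * a + 1 ∨ n = 3 * a + 2 ∨ 3 * a + 3 ≤ n) with h1 | h1 | h1
    · exfalso
      have hb : b = a := by omega
      rcases (by omega : a ≤ 2 ∨ 2 < a) with h' | h' <;> nlinarith
    · exfalso
      have hb : b = a := by omega
      rcases (by omega : a ≤ 4 ∨ 4 < a) with h' | h' <;> nlinarith
    · exact h1
  omega

-- when A's check passes, the derived legs are positive
theorem pass_pos (n a : Int) (ha : 1 ≤ a) (hlt : a < Int.fdiv n 3)
    (h : (n - a - pb n a) * (n - a - pb n a) = a * a + pb n a * pb n a) :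
    0 < pb n a ∧ 0 < n - a - pb n a := by
  have hn : 3 * a + 3 ≤ n := by rw [Int.fdiv_eq_ediv] at hlt; omega
  have hlin : pb n a * (2 * n - 2 * a) = n * n - 2 * a * n := triplet_linear n a (pb n a) h.symm
  have hb : 0 < pb n a := by nlinarith
  have hclin : (n - a - pb n a) * (2 * n - 2 * a) = (n - a) * (n - a) + a * a := by
    linear_combination -hlin
  have hcc : 0 < n - a - pb n a := by nlinarith
  exact ⟨hb, hcc⟩

-- B-side lemmas (two-pointer invariants) -------------------------------------

-- the accumulator never decreases
theorem loopB_mono (n : Int) :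
    ∀ (k : Nat) (a b s : Int), (b + 1 - a).toNat ≤ k → s ≤ loopB n a b s := by
  intro k
  induction k with
  | zero =>
    intro a b s hk
    rw [loopB, dif_neg (by omega)]
  | succ k ih =>
    intro a b s hk
    rw [loopB]
    by_cases h : a ≤ b
    · rw [dif_pos h]
      dsimp only
      split_ifs with h1 h2
      · exact ih (a + 1) b s (by omega)
      · exact ih a (b - 1) s (by omega)
      · exact le_trans (le_max_left s _) (ih (a + 1) b _ (by omega))
    · rw [dif_neg h]

-- every triplet inside the current window is still found
theorem loopB_ge (n : Int) :
    ∀ (k : Nat) (a b s x y : Int), (b + 1 - a).toNat ≤ k → TripP n x y →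
      b ≤ n - 2 → a ≤ x → y ≤ b → x * y * (n - x - y) ≤ loopB n a b s := by
  intro k
  induction k with
  | zero =>
    intro a b s x y hk ht hb hax hyb
    exfalso
    have hxy := ht.2.1
    omega
  | succ k ih =>
    intro a b s x y hk ht hb hax hyb
    obtain ⟨hx1, hxy, hcpos, heq⟩ := ht
    have h : a ≤ b := by omega
    rw [loopB, dif_pos h]
    dsimp only
    split_ifs with h1 h2
    · -- f < 0 : the row a holds no triplet, so x > a
      have hax' : a + 1 ≤ x := by
        rcases lt_or_eq_of_le hax with h' | h'
        · omega
        · exfalso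
          subst h'
          have hid : (a * a + b * b - (n - a - b) * (n - a - b)) -
              (a * a + y * y - (n - a - y) * (n - a - y)) = 2 * (n - a) * (b - y) := by ring
          have h0 : a * a + y * y - (n - a - y) * (n - a - y) = 0 := by linarith
          nlinarith [mul_nonneg (show (0 : Int) ≤ n - a by omega)
            (show (0 : Int) ≤ b - y by omega)]
      exact ih (a + 1) b s x y (by omega) ⟨hx1, hxy, hcpos, heq⟩ hb hax' hyb
    · -- f > 0 : the column b holds no triplet, so y < b
      have hyb' : y ≤ b - 1 := by
        rcases lt_or_eq_of_le hyb with h' | h'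
        · omega
        · exfalso
          subst h'
          have hid : (y * y + x * x - (n - y - x) * (n - y - x)) -
              (a * a + y * y - (n - a - y) * (n - a - y)) = 2 * (n - y) * (x - a) := by ring
          have h0 : x * x + y * y - (n - x - y) * (n - x - y) = 0 := by linarith
          nlinarith [mul_nonneg (show (0 : Int) ≤ n - y by omega)
            (show (0 : Int) ≤ x - a by omega)]
      exact ih a (b - 1) s x y (by omega) ⟨hx1, hxy, hcpos, heq⟩ (by omega) hax hyb'
    · -- f = 0
      by_cases hax0 : a = x
      · -- then also y = b: the found pair IS (x, y)
        have hyb0 : y = b := by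
          by_contra hne
          subst hax0
          have hid : (a * a + b * b - (n - a - b) * (n - a - b)) -
              (a * a + y * y - (n - a - y) * (n - a - y)) = 2 * (n - a) * (b - y) := by ring
          have h0 : a * a + y * y - (n - a - y) * (n - a - y) = 0 := by linarith
          have hf0 : a * a + b * b - (n - a - b) * (n - a - b) = 0 := by omega
          have : 2 * (n - a) * (b - y) = 0 := by linarith
          have hna : 0 < n - a := by omega
          have hby : 0 < b - y := by omega
          nlinarith
        rw [← hax0, hyb0]
        exact le_trans (le_max_right s _) (loopB_mono n k (a + 1) b _ (by omega))
      · exact ih (a + 1) b (max s (a * b * (n - a - b))) x y (by omega)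
          ⟨hx1, hxy, hcpos, heq⟩ hb (by omega) hyb

-- the loop's result is the start value or the product of a genuine triplet
theorem loopB_cases (n : Int) :
    ∀ (k : Nat) (a b s : Int), (b + 1 - a).toNat ≤ k → 1 ≤ a → b ≤ n - 2 →
      loopB n a b s = s ∨
        ∃ x y, TripP n x y ∧ loopB n a b s = x * y * (n - x - y) := by
  intro k
  induction k with
  | zero =>
    intro a b s hk ha hb
    left; rw [loopB, dif_neg (by omega)]
  | succ k ih =>
    intro a b s hk ha hb
    rw [loopB]
    by_cases h : a ≤ b
    · rw [dif_pos h]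
      dsimp only
      split_ifs with h1 h2
      · exact ih (a + 1) b s (by omega) (by omega) hb
      · exact ih a (b - 1) s (by omega) ha (by omega)
      · -- f = 0 : (a, b) is a genuine triplet (its c is positive inside the window)
        have heq : a * a + b * b = (n - a - b) * (n - a - b) := by omega
        have hcpos : 0 < n - a - b := by
          by_contra hcn
          have h7 : (a - n) * (a + 2 * b - n) = a * a := by linear_combination -heq
          have h8 : (a - n) * (a + 2 * b - n) < 0 :=
            mul_neg_of_neg_of_pos (by omega) (by omega)
          have h9 := mul_self_nonneg a
          linarith [h7 ▸ h8]
        have htrip : TripP n a b := ⟨ha, h, hcpos, heq⟩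
        rcases ih (a + 1) b (max s (a * b * (n - a - b))) (by omega) (by omega) hb with
          h0 | ⟨x, y, ht, hv⟩
        · rcases max_choice s (a * b * (n - a - b)) with hm | hm
          · left; rw [h0, hm]
          · right; exact ⟨a, b, htrip, by rw [h0, hm]⟩
        · right; exact ⟨x, y, ht, hv⟩
    · left; rw [dif_neg h]

-- main directions -----------------------------------------------------------

-- any value A's loop can produce is attained by B's loop
theorem A_le_B (n : Int) :
    (PySem.List.pyRange 1 (Int.fdiv n 3) 1).foldl (gA n) (-1) ≤ loopB n 1 (n - 2) (-1) := by
  rcases foldl_cases (g := gA n)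
      (P := fun a r => (n - a - pb n a) * (n - a - pb n a) = a * a + pb n a * pb n a ∧
        r = a * pb n a * (n - a - pb n a))
      (by
        intro s a
        unfold gA
        split_ifs with hq
        · rcases max_choice s (a * pb n a * (n - a - pb n a)) with h0 | h0
          · left; exact h0
          · right; exact ⟨hq, h0⟩
        · left; rfl)
      (PySem.List.pyRange 1 (Int.fdiv n 3) 1) (-1) with hA | ⟨a, hmem, hq, hval⟩
  · rw [hA]; exact loopB_mono n (n - 2 + 1 - 1).toNat 1 (n - 2) (-1) le_rfl
  · rw [hval]
    obtain ⟨ha1, ha2⟩ := (PySem.List.mem_pyRange_one).mp hmem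
    obtain ⟨hbpos, hcpos⟩ := pass_pos n a ha1 ha2 hq
    have hn : 3 * a + 3 ≤ n := by rw [Int.fdiv_eq_ediv] at ha2; omega
    set b := pb n a with hbdef
    have heq' : a * a + b * b = (n - a - b) * (n - a - b) := hq.symm
    rcases le_total a b with hab | hab
    · exact loopB_ge n (n - 2 + 1 - 1).toNat 1 (n - 2) (-1) a b le_rfl
        ⟨ha1, hab, hcpos, heq'⟩ le_rfl (by omega) (by omega)
    · have heq'' : b * b + a * a = (n - b - a) * (n - b - a) := by linear_combination heq'
      have hv : a * b * (n - a - b) = b * a * (n - b - a) := by ring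
      rw [hv]
      exact loopB_ge n (n - 2 + 1 - 1).toNat 1 (n - 2) (-1) b a le_rfl
        ⟨by omega, hab, by omega, heq''⟩ le_rfl (by omega) (by omega)

-- any value B's loop can produce is attained by A's loop
theorem B_le_A (n : Int) :
    loopB n 1 (n - 2) (-1) ≤ (PySem.List.pyRange 1 (Int.fdiv n 3) 1).foldl (gA n) (-1) := by
  rcases loopB_cases n (n - 2 + 1 - 1).toNat 1 (n - 2) (-1) le_rfl le_rfl le_rfl with
    hB | ⟨x, y, ⟨hx1, hxy, hcpos, heq⟩, hval⟩
  · rw [hB]; exact foldl_mono_le (gA_mono n) _ _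
  · rw [hval]
    have halt : x < Int.fdiv n 3 := leg_lt_third n x y hx1 hxy hcpos heq
    have hpb : pb n x = y := pb_exact n x y (by omega) heq
    refine foldl_ge_elem (gA_mono n) (x := x) (v := x * y * (n - x - y)) ?_ _
      ((PySem.List.mem_pyRange_one).mpr ⟨hx1, halt⟩) _
    intro s
    unfold gA
    rw [hpb, if_pos heq.symm]
    exact le_max_right _ _

-- ===== VERDICT (by name: the statement is the Claim_ definition above) =====
theorem solution_spec : Claim_equal_solution := by
  intro n _
  unfold Spec_solution solution_alt
  rw [solution_eq_fold]
  exact le_antisymm (A_le_B n) (B_le_A n)
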